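-- pv_equiv track=rewrite | github.com/TheDarkLightX/TauLang-Experiments | scripts/run_eml_depth4_probe.py | corpus_counts
-- ===== SOURCE A (Python) =====
-- def corpus_counts(max_depth: int) -> list[int]:
--     counts = [2]
--     total_before = 2
--     total_before_previous = 0
--     for _depth in range(1, max_depth + 1):
--         count = total_before * total_before - total_before_previous * total_before_previous
--         counts.append(count)
--         total_before_previous = total_before
--         total_before += count
--     return counts
-- ===== SOURCE B (Python) =====
-- def corpus_counts(max_depth: int) -> list[int]:
--     # Recursive: the corpus total so far is just sum(counts), and it obeys the
--     # collapsed identity next_total = total**2 + 2 (A's difference-of-squares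
--     # recurrence telescopes), so the next count is total**2 + 2 - total.
--     if max_depth <= 0:
--         return [2]
--     prev = corpus_counts(max_depth - 1)
--     t = sum(prev)
--     return prev + [t * t + 2 - t]
-- ===== Notes on version B (the rewrite author's own statement) =====
-- stated objective: alternative
-- what changed: Recursion on max_depth instead of a loop: the running total is re-derived each step as sum(prev) and A's two-variable difference-of-squares recurrence is replaced by the collapsed identity next_count = t*t + 2 - t (since the total satisfies T_n = T_{n-1}^2 + 2 by telescoping), so no pair of totals is carried at all.
import Mathlib
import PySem

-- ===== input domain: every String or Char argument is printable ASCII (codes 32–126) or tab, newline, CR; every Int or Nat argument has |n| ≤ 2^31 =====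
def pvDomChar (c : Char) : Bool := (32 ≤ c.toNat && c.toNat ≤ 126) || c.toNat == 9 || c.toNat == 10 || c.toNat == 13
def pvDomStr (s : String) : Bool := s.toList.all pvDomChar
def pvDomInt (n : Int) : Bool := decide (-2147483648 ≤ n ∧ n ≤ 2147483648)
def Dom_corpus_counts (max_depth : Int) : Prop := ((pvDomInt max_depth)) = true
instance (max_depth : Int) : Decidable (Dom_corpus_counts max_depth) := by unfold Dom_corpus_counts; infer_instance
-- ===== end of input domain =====

-- B is an alternative recursive decomposition (total re-derived as sum, collapsed recurrence t*t+2-t); same value proved equal for every Int.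

-- ===== PORT A =====
-- single loop carrying (counts, total_before, total_before_previous)
def corpus_counts (max_depth : Int) : List Int :=
  let r := (PySem.List.pyRange 1 (max_depth + 1) 1).foldl
    (fun (st : List Int × Int × Int) _depth =>
      let counts := st.1
      let total_before := st.2.1
      let total_before_previous := st.2.2
      let count := total_before * total_before - total_before_previous * total_before_previous
      (counts ++ [count], total_before + count, total_before))
    ([(2 : Int)], (2 : Int), (0 : Int))
  r.1

-- ===== PORT B =====
-- Source B's recursion: base case [2]; otherwise recurse, re-derive the total as the
-- sum of the previous list, and append t*t + 2 - t
def corpus_counts_alt (max_depth : Int) : List Int :=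
  if _h : max_depth ≤ 0 then [2]
  else
    let prev := corpus_counts_alt (max_depth - 1)
    let t := prev.sum
    prev ++ [t * t + 2 - t]
termination_by max_depth.toNat
decreasing_by omega

-- ===== PRECONDITION & SPEC =====
def Spec_corpus_counts (max_depth : Int) (out : List Int) : Prop := out = corpus_counts_alt max_depth
instance (max_depth : Int) (out : List Int) : Decidable (Spec_corpus_counts max_depth out) := by unfold Spec_corpus_counts; infer_instance

-- ===== CLAIM =====
def Claim_equal_corpus_counts : Prop := ∀ (max_depth : Int), Dom_corpus_counts max_depth → Spec_corpus_counts max_depth (corpus_counts max_depth)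

-- ===== LEMMAS AND PROOFS =====

-- the cumulative-total sequence of A (T 0 = virtual total before depth 0)
def T : Nat → Int
  | 0 => 0
  | 1 => 2
  | n + 2 => T (n + 1) + (T (n + 1) ^ 2 - T n ^ 2)

-- the difference-of-squares recurrence telescopes to T (n+1) = T n ^ 2 + 2
theorem T_sq : ∀ n : Nat, T (n + 1) = T n ^ 2 + 2 := by
  intro n
  induction n with
  | zero => decide
  | succ m ih =>
    have : T (m + 2) = T (m + 1) + (T (m + 1) ^ 2 - T m ^ 2) := rfl
    rw [this, ih]; ring

theorem A_loop (l : List Int) : ∀ (acc : List Int) (k : Nat),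
    l.foldl
      (fun (st : List Int × Int × Int) _depth =>
        let counts := st.1
        let total_before := st.2.1
        let total_before_previous := st.2.2
        let count := total_before * total_before - total_before_previous * total_before_previous
        (counts ++ [count], total_before + count, total_before))
      (acc, T (k + 1), T k)
    = (acc ++ (List.range l.length).map (fun j => T (k + j + 1) ^ 2 - T (k + j) ^ 2),
       T (k + l.length + 1), T (k + l.length)) := by
  induction l with
  | nil => intro acc k; simp
  | cons x xs ih =>
    intro acc k
    simp only [List.foldl_cons]
    have h2 : T (k + 1) * T (k + 1) - T k * T k = T (k + 1) ^ 2 - T k ^ 2 := by ring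
    have h3 : T (k + 1) + (T (k + 1) ^ 2 - T k ^ 2) = T ((k + 1) + 1) := by
      rw [show (k + 1) + 1 = k + 2 from rfl]; simp [T]
    rw [h2, h3, ih (acc ++ [T (k + 1) ^ 2 - T k ^ 2]) (k + 1)]
    refine congrArg₂ Prod.mk ?_ (congrArg₂ Prod.mk ?_ ?_)
    · rw [List.append_assoc, List.singleton_append, List.length_cons,
        List.range_succ_eq_map, List.map_cons, List.map_map]
      refine congrArg₂ (· ++ ·) rfl (congrArg₂ List.cons ?_ ?_)
      · norm_num
      · apply List.map_congr_left
        intro j _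
        simp only [Function.comp_apply, Nat.succ_eq_add_one]
        rw [show k + 1 + j + 1 = k + (j + 1) + 1 from by omega,
            show k + 1 + j = k + (j + 1) from by omega]
    · simp only [List.length_cons]; congr 1; omega
    · simp only [List.length_cons]; congr 1; omega

theorem corpus_counts_eq (max_depth : Int) :
    corpus_counts max_depth
      = 2 :: (List.range max_depth.toNat).map (fun j => T (j + 1) ^ 2 - T j ^ 2) := by
  unfold corpus_counts
  have h := A_loop (PySem.List.pyRange 1 (max_depth + 1) 1) [2] 0
  simp only [show T 1 = 2 from rfl, show T 0 = 0 from rfl] at h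
  simp only [h, PySem.List.length_pyRange_one]
  have : (max_depth + 1 - 1).toNat = max_depth.toNat := by omega
  rw [this]
  simp

-- the sum of the first counts is the cumulative total T (n+1)
theorem sum_counts : ∀ n : Nat,
    ((2 : Int) :: (List.range n).map (fun j => T (j + 1) ^ 2 - T j ^ 2)).sum = T (n + 1) := by
  intro n
  induction n with
  | zero => decide
  | succ m ih =>
    rw [List.range_succ, List.map_append, List.sum_cons] at *
    simp only [List.map_cons, List.map_nil, List.sum_append, List.sum_cons, List.sum_nil]
    have hrec : T (m + 1 + 1) = T (m + 1) + (T (m + 1) ^ 2 - T m ^ 2) := rfl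
    linarith [ih, hrec]

theorem alt_eq_aux : ∀ (k : Nat) (md : Int), md.toNat = k →
    corpus_counts_alt md
      = 2 :: (List.range k).map (fun j => T (j + 1) ^ 2 - T j ^ 2) := by
  intro k
  induction k with
  | zero =>
    intro md hk
    have h0 : md ≤ 0 := by omega
    rw [corpus_counts_alt]
    simp [h0]
  | succ m ih =>
    intro md hk
    have h0 : ¬ md ≤ 0 := by omega
    rw [corpus_counts_alt]
    simp only [h0, dite_false]
    rw [ih (md - 1) (by omega), sum_counts m]
    rw [List.range_succ, List.map_append]
    simp only [List.map_cons, List.map_nil, List.cons_append]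
    congr 2
    have hsq : T (m + 2) = T (m + 1) ^ 2 + 2 := T_sq (m + 1)
    have hrec : T (m + 2) = T (m + 1) + (T (m + 1) ^ 2 - T m ^ 2) := rfl
    have : T (m + 1) * T (m + 1) + 2 - T (m + 1) = T (m + 1) ^ 2 - T m ^ 2 := by
      have := hsq; have := hrec; nlinarith [hsq, hrec]
    rw [this]

-- ===== VERDICT =====
theorem corpus_counts_spec : Claim_equal_corpus_counts := by
  intro max_depth _
  show corpus_counts max_depth = corpus_counts_alt max_depth
  rw [corpus_counts_eq, alt_eq_aux max_depth.toNat max_depth rfl]
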